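-- pv_equiv track=rewrite | github.com/CybYang/Project-NLP_learning_contest | prepare.py | undirected_dedup
-- ===== SOURCE A (Python) =====
-- def undirected_dedup(rows):
--     """无向去重：把 (A,B) 与 (B,A) 视为同一条；冲突时保留正样本。"""
--     seen = {}
--     for q1, q2, y in rows:
--         a, b = (q1, q2) if q1 <= q2 else (q2, q1)
--         key = (a, b)
--         if key in seen:
--             if seen[key] == "0" and y == "1":
--                 seen[key] = "1"
--         else:
--             seen[key] = y
--     return [(a, b, y) for (a, b), y in seen.items()]
-- ===== SOURCE B (Python) =====
-- def undirected_dedup(rows):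
--     """Worklist nub: normalize all pairs once, then repeatedly take the first
--     remaining pair, derive its label from the rest of the worklist, and filter
--     out every later duplicate of that key -- no dictionary at all."""
--     pending = [((q1, q2) if q1 <= q2 else (q2, q1), y) for q1, q2, y in rows]
--     out = []
--     while pending:
--         (key, y), rest = pending[0], pending[1:]
--         label = "1" if y == "0" and (key, "1") in rest else y
--         out.append((key[0], key[1], label))
--         pending = [p for p in rest if p[0] != key]
--     return out
-- ===== Notes on version B (the rewrite author's own statement) =====
-- stated objective: alternative
-- what changed: Replaces A's hash-map accumulation (dict keyed by the normalized pair, upgraded in place) by a dict-free worklist nub: repeatedly emit the first remaining normalized pair, read its label off the rest of the worklist, and filter out all later duplicates of that key.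
import Mathlib
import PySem

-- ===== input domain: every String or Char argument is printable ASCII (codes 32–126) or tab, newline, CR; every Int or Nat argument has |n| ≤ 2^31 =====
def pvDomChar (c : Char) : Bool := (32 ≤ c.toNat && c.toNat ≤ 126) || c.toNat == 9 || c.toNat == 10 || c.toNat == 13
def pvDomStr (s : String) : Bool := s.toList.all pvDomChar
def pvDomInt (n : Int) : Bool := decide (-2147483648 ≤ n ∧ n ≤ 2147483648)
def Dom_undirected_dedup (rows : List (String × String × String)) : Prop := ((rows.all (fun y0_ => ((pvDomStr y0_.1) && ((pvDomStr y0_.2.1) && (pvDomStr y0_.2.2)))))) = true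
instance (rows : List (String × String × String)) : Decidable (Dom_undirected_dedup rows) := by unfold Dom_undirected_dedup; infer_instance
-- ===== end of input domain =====

-- B replaces A's dict-with-conditional-upgrade loop by a dict-free worklist nub: take the first
-- remaining pair, read its label off the rest of the worklist, filter out later duplicates, repeat.
-- Objective: alternative algorithm (no hash map), same return value; B is O(n^2), not faster.

-- ===== PORT A =====
-- loop body on the already-normalized key (the 'if key in seen … else …' block)
def pvStep (d : PySem.Dict (String × String) String) (p : (String × String) × String) :
    PySem.Dict (String × String) String :=
  match d.get? p.1 with
  | some v => if v == "0" && p.2 == "1" then d.insert p.1 "1" else d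
  | none => d.insert p.1 p.2

def pvStepA (d : PySem.Dict (String × String) String) (r : String × String × String) :
    PySem.Dict (String × String) String :=
  pvStep d (if r.1 ≤ r.2.1 then (r.1, r.2.1) else (r.2.1, r.1), r.2.2)

def undirected_dedup (rows : List (String × String × String)) : List (String × String × String) :=
  let seen := rows.foldl pvStepA PySem.Dict.empty
  seen.items.map (fun p => (p.1.1, p.1.2, p.2))

-- ===== PORT B =====
-- the normalization comprehension building the initial worklist
def pvNorm (rows : List (String × String × String)) : List ((String × String) × String) :=
  rows.map (fun r => (if r.1 ≤ r.2.1 then (r.1, r.2.1) else (r.2.1, r.1), r.2.2))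

-- the while-loop over the shrinking worklist (recursion = the loop; terminates since filter shrinks)
def pvGo : List ((String × String) × String) → List (String × String × String)
  | [] => []
  | (key, y) :: rest =>
    (key.1, key.2, if y == "0" && rest.contains (key, "1") then "1" else y)
      :: pvGo (rest.filter (fun p => p.1 != key))
termination_by l => l.length
decreasing_by simpa using Nat.lt_succ_of_le ((List.length_filter_le _ rest.attach).trans (by simp))

def undirected_dedup_alt (rows : List (String × String × String)) : List (String × String × String) :=
  pvGo (pvNorm rows)

-- ===== PRECONDITION & SPEC =====
def Spec_undirected_dedup (rows : List (String × String × String)) (out : List (String × String × String)) : Prop := out = undirected_dedup_alt rows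
instance (rows : List (String × String × String)) (out : List (String × String × String)) : Decidable (Spec_undirected_dedup rows out) := by unfold Spec_undirected_dedup; infer_instance

-- ===== CLAIM (what is proved, stated in full; the proofs are below) =====
def Claim_equal_undirected_dedup : Prop := ∀ (rows : List (String × String × String)), Dom_undirected_dedup rows → Spec_undirected_dedup rows (undirected_dedup rows)

-- ===== LEMMAS AND PROOFS =====

lemma pvFoldA_eq (rows : List (String × String × String))
    (d : PySem.Dict (String × String) String) :
    rows.foldl pvStepA d = (pvNorm rows).foldl pvStep d := by
  rw [pvNorm, List.foldl_map]; rfl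

/-- Main invariant: folding A's loop body over a worklist `l` starting from dict `d`
yields, as flattened items, d's items with labels upgraded by `l`, followed by
B's worklist-nub output on the part of `l` whose keys are new to `d`. -/
lemma pvFoldItems (l : List ((String × String) × String)) :
    ∀ d : PySem.Dict (String × String) String, d.keys.Nodup →
    (l.foldl pvStep d).items.map (fun p => (p.1.1, p.1.2, p.2))
      = d.items.map (fun p => (p.1.1, p.1.2, if p.2 = "0" ∧ (p.1, "1") ∈ l then "1" else p.2))
        ++ pvGo (l.filter (fun p => !(d.contains p.1))) := by
  induction l with
  | nil => intro d hd; rw [pvGo.eq_def]; simp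
  | cons hd0 t ih =>
    obtain ⟨k, y⟩ := hd0
    intro d hd
    rw [List.foldl_cons]
    have hmemt : ∀ p : (String × String) × String, p.1 ≠ k →
        (((p.1, "1") ∈ ((k, y) :: t : List ((String × String) × String))) ↔ ((p.1, "1") ∈ t)) := by
      intro p hpk
      simp only [List.mem_cons]
      constructor
      · rintro (h | h)
        · exact absurd (congrArg Prod.fst h) hpk
        · exact h
      · exact Or.inr
    cases hc : d.contains k with
    | true =>
      have hg' := PySem.Dict.contains_eq_isSome_get? d k
      rcases hg : d.get? k with _ | v
      · rw [hg] at hg'; rw [hg'] at hc; simp at hc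
      have hstep : pvStep d (k, y) = if v = "0" ∧ y = "1" then d.insert k "1" else d := by
        simp only [pvStep, hg]
        split_ifs with h1 h2 <;> simp_all
      have hfR : ((k, y) :: t).filter (fun p => !(d.contains p.1))
          = t.filter (fun p => !(d.contains p.1)) := by
        simp [hc]
      have hfI : ∀ w, t.filter (fun p => !((d.insert k w).contains p.1))
          = t.filter (fun p => !(d.contains p.1)) := by
        intro w
        apply List.filter_congr
        intro p _
        rw [PySem.Dict.contains_insert]
        cases hpk : (p.1 == k) with
        | true => rw [beq_iff_eq] at hpk; simp [hpk, hc]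
        | false => simp
      by_cases hb : v = "0" ∧ y = "1"
      · rw [hstep, if_pos hb]
        rw [ih (d.insert k "1") (PySem.Dict.nodup_keys_insert d k "1" hd), hfI, hfR]
        congr 1
        rw [PySem.Dict.items_insert_of_contains d "1" hc, List.map_map]
        apply List.map_congr_left
        intro p hp
        by_cases hpk : p.1 = k
        · have hpv : d.get? p.1 = some p.2 := PySem.Dict.get?_of_mem_items d hp hd
          rw [hpk, hg] at hpv
          have hv : v = p.2 := by injection hpv
          have hmem : ((p.1, "1") : (String × String) × String) ∈ ((k, y) :: t : List ((String × String) × String)) := by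
            rw [hpk, ← hb.2]
            exact List.mem_cons_self ..
          have hp2 : p.2 = "0" := hv.symm.trans hb.1
          simp [Function.comp, hpk, hp2]
          exact fun h => absurd hb.2.symm h
        · simp [Function.comp, hpk, hmemt p hpk]
      · rw [hstep, if_neg hb]
        rw [ih d hd, hfR]
        congr 1
        apply List.map_congr_left
        intro p hp
        by_cases hpk : p.1 = k
        · have hpv : d.get? p.1 = some p.2 := PySem.Dict.get?_of_mem_items d hp hd
          rw [hpk, hg] at hpv
          have hv : v = p.2 := by injection hpv
          by_cases hv0 : p.2 = "0"
          · have hy1 : y ≠ "1" := fun h => hb ⟨hv.trans hv0, h⟩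
            have hiff : (((p.1, "1") ∈ ((k, y) :: t : List ((String × String) × String))) ↔ ((p.1, "1") ∈ t)) := by
              simp only [List.mem_cons]
              constructor
              · rintro (h | h)
                · exact absurd (congrArg Prod.snd h).symm hy1
                · exact h
              · exact Or.inr
            simp [hiff]
          · simp [hv0]
        · simp [hmemt p hpk]
    | false =>
      have hg : d.get? k = none := by
        have h2 := PySem.Dict.contains_eq_isSome_get? d k
        rw [hc] at h2
        exact Option.not_isSome_iff_eq_none.mp (by simp [← h2])
      have hstep : pvStep d (k, y) = d.insert k y := by simp [pvStep, hg]
      have hkeys : ∀ p : (String × String) × String, p ∈ d.items → p.1 ≠ k := by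
        intro p hp hpk
        have hmemk : d.contains p.1 = true :=
          (PySem.Dict.contains_iff_mem_keys d p.1).mpr (PySem.Dict.mem_keys_of_mem_items d hp)
        rw [hpk, hc] at hmemk
        cases hmemk
      rw [hstep, ih (d.insert k y) (PySem.Dict.nodup_keys_insert d k y hd)]
      rw [PySem.Dict.items_insert_of_not_contains d y hc, List.map_append]
      have hfR : ((k, y) :: t).filter (fun p => !(d.contains p.1))
          = (k, y) :: t.filter (fun p => !(d.contains p.1)) := by
        simp [hc]
      have hGo : ∀ (key : String × String) (yy : String) (rest : List ((String × String) × String)),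
          pvGo ((key, yy) :: rest)
            = (key.1, key.2, if yy == "0" && rest.contains (key, "1") then "1" else yy)
              :: pvGo (rest.filter (fun p => p.1 != key)) := by
        intro key yy rest; rw [pvGo.eq_def]
      rw [hfR, hGo]
      have hmap : d.items.map (fun p => (p.1.1, p.1.2, if p.2 = "0" ∧ (p.1, "1") ∈ t then "1" else p.2))
          = d.items.map (fun p => (p.1.1, p.1.2, if p.2 = "0" ∧ (p.1, "1") ∈ (k, y) :: t then "1" else p.2)) := by
        apply List.map_congr_left
        intro p hp
        simp [hmemt p (hkeys p hp)]
      have hlabel : ((t.filter (fun p => !(d.contains p.1))).contains ((k, y).1, "1"))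
          = ((k, "1") ∈ t : Bool) := by
        simp [List.mem_filter, hc]
      have hrec : (t.filter (fun p => !(d.contains p.1))).filter (fun p => p.1 != (k, y).1)
          = t.filter (fun p => !((d.insert k y).contains p.1)) := by
        rw [List.filter_filter]
        apply List.filter_congr
        intro p _
        simp [PySem.Dict.contains_insert, Bool.not_or, bne]
      rw [hlabel, hrec, List.append_assoc, ← hmap]
      congr 1
      simp only [List.map_cons, List.map_nil, List.singleton_append]
      congr 1
      by_cases hy : y = "0" <;> by_cases hm : (k, "1") ∈ t <;> simp [hy, hm]
-- ===== VERDICT (by name: the statement is the Claim_ definition above) =====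
theorem undirected_dedup_spec : Claim_equal_undirected_dedup := by
  intro rows _
  unfold Spec_undirected_dedup undirected_dedup undirected_dedup_alt
  rw [pvFoldA_eq, pvFoldItems (pvNorm rows) PySem.Dict.empty PySem.Dict.nodup_keys_empty]
  simp [PySem.Dict.empty]
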